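-- pv_equiv track=rewrite | github.com/WncFht/GenRec | fixed_hint_logit_processor.py | find_last_prefix_match_start
-- ===== SOURCE A (Python) =====
-- def find_last_prefix_match_start(sent: list[int], prefix_ids: list[int]) -> int:
--     if not prefix_ids:
--         return 0
--     prefix_len = len(prefix_ids)
--     for start in range(len(sent) - prefix_len, -1, -1):
--         if sent[start : start + prefix_len] == prefix_ids:
--             return start
--     raise ValueError("Failed to find prompt suffix prefix_ids inside current sequence.")
-- ===== SOURCE B (Python) =====
-- _MOD = 2305843009213693951  # 2**61 - 1
-- _BASE = 1000003
--
--
-- def find_last_prefix_match_start(sent: list[int], prefix_ids: list[int]) -> int: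
--     if not prefix_ids:
--         return 0
--     n = len(sent)
--     m = len(prefix_ids)
--     hp = 0
--     for x in prefix_ids:
--         hp = (hp * _BASE + x) % _MOD
--     h = 0
--     for x in sent[:m]:
--         h = (h * _BASE + x) % _MOD
--     powm = pow(_BASE, m - 1, _MOD)
--     best = -1
--     for i in range(n - m + 1):
--         if h == hp and sent[i : i + m] == prefix_ids:
--             best = i
--         if i < n - m:
--             h = ((h - sent[i] * powm) * _BASE + sent[i + m]) % _MOD
--     if best < 0:
--         raise ValueError("Failed to find prompt suffix prefix_ids inside current sequence.")
--     return best
-- ===== Notes on version B (the rewrite author's own statement) =====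
-- stated objective: alternative
-- what changed: Replaces A's backward scan that slice-compares the pattern at every start by a Rabin-Karp rolling-hash forward scan: the window hash is updated in O(1) per shift, the full slice is compared only on a hash hit, and the last verified hit is kept.
import Mathlib
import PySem

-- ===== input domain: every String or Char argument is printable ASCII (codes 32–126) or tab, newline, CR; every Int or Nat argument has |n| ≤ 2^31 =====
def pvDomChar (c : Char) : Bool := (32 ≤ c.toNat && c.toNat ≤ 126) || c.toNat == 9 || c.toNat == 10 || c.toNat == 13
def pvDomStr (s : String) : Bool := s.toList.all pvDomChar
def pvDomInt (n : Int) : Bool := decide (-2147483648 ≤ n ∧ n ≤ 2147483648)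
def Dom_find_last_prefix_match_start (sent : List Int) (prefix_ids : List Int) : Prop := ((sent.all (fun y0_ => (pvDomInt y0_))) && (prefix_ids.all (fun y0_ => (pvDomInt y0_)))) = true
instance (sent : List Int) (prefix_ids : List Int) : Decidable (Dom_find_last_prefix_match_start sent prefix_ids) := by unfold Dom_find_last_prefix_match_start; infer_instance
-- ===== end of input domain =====

-- B replaces A's backward scan of quadratically many slice comparisons by a Rabin–Karp rolling-hash
-- scan (hash hit verified exactly, last hit kept); objective: alternative algorithm, exact same values.

-- ===== PORT A =====
-- literal port of A: scan starts from len(sent)-m down to 0, return the first slice match; the raise path becomes -1 (excluded by Pre_)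
def find_last_prefix_match_start (sent : List Int) (prefix_ids : List Int) : Int :=
  if prefix_ids = [] then 0
  else
    let prefix_len : Int := prefix_ids.length
    match (PySem.List.pyRange ((sent.length : Int) - prefix_len) (-1) (-1)).foldl
      (fun acc start =>
        if acc.isSome then acc  -- already returned
        else if PySem.List.slice sent (some start) (some (start + prefix_len)) = prefix_ids then
          some start
        else none) none with
    | some r => r
    | none => -1  -- raise ValueError: outside Pre_

-- ===== PORT B =====
-- module constants _MOD and _BASE of Source B
def pvMOD : Int := 2305843009213693951
def pvBASE : Int := 1000003

-- literal port of Source B: Rabin–Karp — hash the pattern and the first window, slide the window with the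
-- rolling update, verify the slice exactly on a hash hit and keep the last verified start in `best`;
-- best = -1 at the end is the raise path (outside Pre_)
def find_last_prefix_match_start_alt (sent : List Int) (prefix_ids : List Int) : Int :=
  if prefix_ids = [] then 0
  else
    let n : Int := sent.length
    let m : Int := prefix_ids.length
    let hp := prefix_ids.foldl (fun h x => PySem.Int.mod (h * pvBASE + x) pvMOD) 0
    let h0 := (PySem.List.slice sent none (some m)).foldl
      (fun h x => PySem.Int.mod (h * pvBASE + x) pvMOD) 0
    let powm := PySem.Int.powMod pvBASE (prefix_ids.length - 1) pvMOD
    let res := (PySem.List.pyRange 0 (n - m + 1) 1).foldl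
      (fun (st : Int × Int) i =>
        let best := if st.1 = hp ∧ PySem.List.slice sent (some i) (some (i + m)) = prefix_ids
          then i else st.2
        let h := if i < n - m then
            PySem.Int.mod ((st.1 - PySem.List.pyGetD sent i 0 * powm) * pvBASE
              + PySem.List.pyGetD sent (i + m) 0) pvMOD
          else st.1
        (h, best)) (h0, -1)
    res.2

-- ===== PRECONDITION & SPEC =====
-- Pre_ excludes exactly the inputs on which Python A raises ValueError (nonempty prefix_ids that occurs nowhere in sent); Python B raises there too.
def Pre_find_last_prefix_match_start (sent : List Int) (prefix_ids : List Int) : Prop :=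
  prefix_ids = [] ∨ prefix_ids <:+: sent
instance (sent : List Int) (prefix_ids : List Int) : Decidable (Pre_find_last_prefix_match_start sent prefix_ids) := by unfold Pre_find_last_prefix_match_start; infer_instance
def pvWitness_find_last_prefix_match_start : List Int × List Int := ([1, 2, 3], [2, 3])

def Spec_find_last_prefix_match_start (sent : List Int) (prefix_ids : List Int) (out : Int) : Prop := out = find_last_prefix_match_start_alt sent prefix_ids
instance (sent : List Int) (prefix_ids : List Int) (out : Int) : Decidable (Spec_find_last_prefix_match_start sent prefix_ids out) := by unfold Spec_find_last_prefix_match_start; infer_instance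

-- ===== CLAIM (what is proved, stated in full; the proofs are below) =====
def Claim_equal_find_last_prefix_match_start : Prop := ∀ (sent : List Int) (prefix_ids : List Int), Dom_find_last_prefix_match_start sent prefix_ids → Pre_find_last_prefix_match_start sent prefix_ids → Spec_find_last_prefix_match_start sent prefix_ids (find_last_prefix_match_start sent prefix_ids)

-- ===== LEMMAS AND PROOFS =====

-- the hash of a window (the fold Source B runs over a list of ints), and its mod-free polynomial value
def pvH (l : List Int) : Int := l.foldl (fun h x => PySem.Int.mod (h * pvBASE + x) pvMOD) 0
def pvRaw (l : List Int) : Int := l.foldl (fun h x => h * pvBASE + x) 0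

theorem pvMOD_pos : (0:Int) < pvMOD := by decide

-- folding with a reduction mod pvMOD at each step = reducing the mod-free fold once at the end
theorem pvH_eq_raw_emod_aux (l : List Int) : ∀ h : Int,
    l.foldl (fun h x => PySem.Int.mod (h * pvBASE + x) pvMOD) (h % pvMOD)
      = (l.foldl (fun h x => h * pvBASE + x) h) % pvMOD := by
  induction l with
  | nil => intro h; rfl
  | cons y l ih =>
    intro h
    simp only [List.foldl_cons]
    have hm : h % pvMOD ≡ h [ZMOD pvMOD] := Int.emod_emod_of_dvd h dvd_rfl
    have hstep : PySem.Int.mod (h % pvMOD * pvBASE + y) pvMOD = (h * pvBASE + y) % pvMOD := by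
      rw [PySem.Int.mod_eq_emod_of_pos pvMOD_pos]
      exact (hm.mul_right pvBASE).add_right y
    rw [hstep]
    exact ih (h * pvBASE + y)

theorem pvH_eq_raw_emod (l : List Int) : pvH l = pvRaw l % pvMOD := by
  have := pvH_eq_raw_emod_aux l 0
  simpa [pvH, pvRaw] using this

-- the mod-free polynomial value, peeled at the front and extended at the back
theorem pvRaw_shift (l : List Int) : ∀ h : Int,
    l.foldl (fun h x => h * pvBASE + x) h = h * pvBASE ^ l.length + pvRaw l := by
  induction l with
  | nil => intro h; simp [pvRaw]
  | cons y l ih =>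
    intro h
    simp only [List.foldl_cons, List.length_cons]
    rw [ih (h * pvBASE + y)]
    have : pvRaw (y :: l) = y * pvBASE ^ l.length + pvRaw l := by
      simpa [pvRaw] using ih y
    rw [this]; ring

theorem pvRaw_cons (x : Int) (l : List Int) :
    pvRaw (x :: l) = x * pvBASE ^ l.length + pvRaw l := by
  simpa [pvRaw] using pvRaw_shift l x

theorem pvRaw_append_singleton (l : List Int) (y : Int) :
    pvRaw (l ++ [y]) = pvRaw l * pvBASE + y := by
  simp [pvRaw, List.foldl_append]

-- the rolling-hash update is exact: from the hash of window x :: ws to the hash of window ws ++ [y]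
theorem pv_roll (x y : Int) (ws : List Int) :
    PySem.Int.mod ((pvH (x :: ws) - x * PySem.Int.powMod pvBASE ws.length pvMOD) * pvBASE + y) pvMOD
      = pvH (ws ++ [y]) := by
  rw [PySem.Int.mod_eq_emod_of_pos pvMOD_pos, PySem.Int.powMod_eq_emod pvBASE ws.length pvMOD_pos,
    pvH_eq_raw_emod, pvH_eq_raw_emod]
  have e1 : pvRaw (x :: ws) % pvMOD ≡ pvRaw (x :: ws) [ZMOD pvMOD] :=
    Int.emod_emod_of_dvd _ dvd_rfl
  have e2 : pvBASE ^ ws.length % pvMOD ≡ pvBASE ^ ws.length [ZMOD pvMOD] :=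
    Int.emod_emod_of_dvd _ dvd_rfl
  have e3 : (pvRaw (x :: ws) % pvMOD - x * (pvBASE ^ ws.length % pvMOD)) * pvBASE + y
      ≡ (pvRaw (x :: ws) - x * pvBASE ^ ws.length) * pvBASE + y [ZMOD pvMOD] :=
    ((e1.sub (e2.mul_left x)).mul_right pvBASE).add_right y
  rw [e3]
  rw [pvRaw_cons, pvRaw_append_singleton]
  ring_nf

-- A's early-return fold is find? on the descending list
theorem pv_foldA_some {α : Type} (P : α → Prop) [DecidablePred P] (l : List α) (r : α) :
    l.foldl (fun acc x =>
      if acc.isSome then acc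
      else if P x then some x else none) (some r) = some r := by
  induction l with
  | nil => rfl
  | cons a l ih => simpa using ih

theorem pv_foldA {α : Type} (P : α → Prop) [DecidablePred P] (l : List α) :
    l.foldl (fun acc x =>
      if acc.isSome then acc
      else if P x then some x else none) none = l.find? (fun x => decide (P x)) := by
  induction l with
  | nil => rfl
  | cons a l ih =>
    by_cases h : P a
    · simp [h, pv_foldA_some]
    · simpa [h] using ih

-- the keep-last fold is find? on the reversed list, with the initial value as default
theorem pv_foldB {α : Type} (P : α → Prop) [DecidablePred P] (l : List α) (b : α) :
    l.foldl (fun b x => if P x then x else b) b = (l.reverse.find? (fun x => decide (P x))).getD b := by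
  induction l generalizing b with
  | nil => rfl
  | cons a l ih =>
    simp only [List.foldl_cons, List.reverse_cons, List.find?_append]
    rw [ih]
    cases hf : l.reverse.find? (fun x => decide (P x)) with
    | some r => simp
    | none => by_cases h : P a <;> simp [h]

-- B's Rabin–Karp pair fold computes the same `best` as the plain keep-last fold: the first component
-- stays the exact hash of the current window, so the hash test is redundant on a true match
theorem pv_foldRK (sent prefix_ids : List Int) (hpne : prefix_ids ≠ [])
    (hmn : prefix_ids.length ≤ sent.length) :
    ∀ (k a : ℕ), a + k = sent.length - prefix_ids.length + 1 →
    ∀ (best h : Int), h = pvH ((sent.drop a).take prefix_ids.length) →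
    ((PySem.List.pyRange (a : Int) ((sent.length : Int) - prefix_ids.length + 1) 1).foldl
      (fun (st : Int × Int) i =>
        let best := if st.1 = prefix_ids.foldl (fun h x => PySem.Int.mod (h * pvBASE + x) pvMOD) 0
              ∧ PySem.List.slice sent (some i) (some (i + (prefix_ids.length : Int))) = prefix_ids
          then i else st.2
        let h := if i < (sent.length : Int) - prefix_ids.length then
            PySem.Int.mod ((st.1 - PySem.List.pyGetD sent i 0
                * PySem.Int.powMod pvBASE (prefix_ids.length - 1) pvMOD) * pvBASE
              + PySem.List.pyGetD sent (i + (prefix_ids.length : Int)) 0) pvMOD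
          else st.1
        (h, best)) (h, best)).2
    = (PySem.List.pyRange (a : Int) ((sent.length : Int) - prefix_ids.length + 1) 1).foldl
        (fun best i =>
          if PySem.List.slice sent (some i) (some (i + (prefix_ids.length : Int))) = prefix_ids
          then i else best) best := by
  have hm1 : 1 ≤ prefix_ids.length := List.length_pos_of_ne_nil hpne
  intro k
  induction k with
  | zero =>
    intro a ha best h hh
    rw [PySem.List.pyRange_one_eq_nil (by omega)]
    rfl
  | succ k ih =>
    intro a ha best h hh
    have hlt : (a : Int) < (sent.length : Int) - prefix_ids.length + 1 := by omega
    rw [PySem.List.pyRange_one_cons hlt]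
    simp only [List.foldl_cons]
    have hbest : (if h = List.foldl (fun h x => PySem.Int.mod (h * pvBASE + x) pvMOD) 0 prefix_ids ∧
          PySem.List.slice sent (some (a : Int)) (some ((a : Int) + (prefix_ids.length : Int))) = prefix_ids
        then ((a : Int)) else best)
        = (if PySem.List.slice sent (some (a : Int)) (some ((a : Int) + (prefix_ids.length : Int))) = prefix_ids
        then ((a : Int)) else best) := by
      by_cases hs : PySem.List.slice sent (some (a : Int)) (some ((a : Int) + (prefix_ids.length : Int))) = prefix_ids
      · have hH : h = List.foldl (fun h x => PySem.Int.mod (h * pvBASE + x) pvMOD) 0 prefix_ids := by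
          rw [hh]
          rw [PySem.List.slice_natCast_add sent a prefix_ids.length] at hs
          rw [hs]
          rfl
        simp [hs, hH]
      · simp [hs]
    rw [hbest]
    by_cases hend : a < sent.length - prefix_ids.length
    · have hi : ((a : Int)) < (sent.length : Int) - (prefix_ids.length : Int) := by omega
      rw [if_pos hi]
      obtain ⟨mm, hmm⟩ : ∃ mm, prefix_ids.length = mm + 1 := ⟨prefix_ids.length - 1, by omega⟩
      have hroll : PySem.Int.mod ((h - PySem.List.pyGetD sent ((a : Int)) 0
            * PySem.Int.powMod pvBASE (prefix_ids.length - 1) pvMOD) * pvBASE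
            + PySem.List.pyGetD sent ((a : Int) + (prefix_ids.length : Int)) 0) pvMOD
          = pvH (List.take prefix_ids.length (List.drop (a + 1) sent)) := by
        have han : a < sent.length := by omega
        have hanm : a + prefix_ids.length < sent.length := by omega
        have hlenws : (List.take mm (List.drop (a + 1) sent)).length = mm := by
          simp [List.length_take, List.length_drop]; omega
        have hwa : List.take prefix_ids.length (List.drop a sent)
            = sent[a] :: List.take mm (List.drop (a + 1) sent) := by
          rw [List.drop_eq_getElem_cons han, hmm, List.take_succ_cons]
        have hwa1 : List.take prefix_ids.length (List.drop (a + 1) sent)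
            = List.take mm (List.drop (a + 1) sent) ++ [sent[a + 1 + mm]] := by
          rw [hmm, List.take_add_one]
          congr 1
          rw [List.getElem?_drop]
          rw [List.getElem?_eq_getElem (by omega)]
          rfl
        have hga : PySem.List.pyGetD sent ((a : Int)) 0 = sent[a] := by
          rw [PySem.List.pyGetD_natCast]
          exact List.getD_eq_getElem sent 0 han
        have hgam : PySem.List.pyGetD sent ((a : Int) + (prefix_ids.length : Int)) 0
            = sent[a + 1 + mm] := by
          rw [show ((a : Int) + (prefix_ids.length : Int)) = ((a + 1 + mm : ℕ) : Int) by
            rw [hmm]; push_cast; ring]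
          rw [PySem.List.pyGetD_natCast]
          exact List.getD_eq_getElem sent 0 (by omega)
        rw [hga, hgam, hh, hwa, hwa1, hmm]
        have hr := pv_roll sent[a] sent[a + 1 + mm] (List.take mm (List.drop (a + 1) sent))
        rw [hlenws] at hr
        exact hr
      rw [hroll]
      exact ih (a + 1) (by omega) _ _ rfl
    · rw [if_neg (by omega : ¬ ((a : Int)) < (sent.length : Int) - (prefix_ids.length : Int))]
      rw [PySem.List.pyRange_one_eq_nil (by omega : (sent.length : Int) - (prefix_ids.length : Int) + 1 ≤ (a : Int) + 1)]
      rfl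

-- ===== VERDICT (by name: the statement is the Claim_ definition above) =====
theorem find_last_prefix_match_start_spec : Claim_equal_find_last_prefix_match_start := by
  intro sent prefix_ids _ _
  unfold Spec_find_last_prefix_match_start
  by_cases hpn : prefix_ids = []
  · simp [find_last_prefix_match_start, find_last_prefix_match_start_alt, hpn]
  · have hA : find_last_prefix_match_start sent prefix_ids
        = ((PySem.List.pyRange 0 ((sent.length : Int) - prefix_ids.length + 1) 1).reverse.find?
            (fun i => decide (PySem.List.slice sent (some i) (some (i + (prefix_ids.length : Int)))
              = prefix_ids))).getD (-1) := by
      unfold find_last_prefix_match_start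
      simp only [hpn, if_false]
      rw [pv_foldA]
      rw [show PySem.List.pyRange ((sent.length : Int) - prefix_ids.length) (-1) (-1)
            = (PySem.List.pyRange 0 ((sent.length : Int) - prefix_ids.length + 1) 1).reverse by
        simpa using PySem.List.pyRange_neg_one_eq_reverse ((sent.length : Int) - prefix_ids.length) (-1)]
      cases (PySem.List.pyRange 0 ((sent.length : Int) - prefix_ids.length + 1) 1).reverse.find?
          (fun i => decide (PySem.List.slice sent (some i) (some (i + (prefix_ids.length : Int)))
            = prefix_ids)) with
      | none => rfl
      | some r => rfl
    have hB : find_last_prefix_match_start_alt sent prefix_ids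
        = ((PySem.List.pyRange 0 ((sent.length : Int) - prefix_ids.length + 1) 1).reverse.find?
            (fun i => decide (PySem.List.slice sent (some i) (some (i + (prefix_ids.length : Int)))
              = prefix_ids))).getD (-1) := by
      unfold find_last_prefix_match_start_alt
      simp only [hpn, if_false]
      have hsimple := pv_foldB
        (fun i => PySem.List.slice sent (some i) (some (i + (prefix_ids.length : Int))) = prefix_ids)
        (PySem.List.pyRange 0 ((sent.length : Int) - prefix_ids.length + 1) 1) (-1)
      by_cases hmn : prefix_ids.length ≤ sent.length
      · have h0 : (PySem.List.slice sent none (some (prefix_ids.length : Int))).foldl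
            (fun h x => PySem.Int.mod (h * pvBASE + x) pvMOD) 0
            = pvH (List.take prefix_ids.length (List.drop 0 sent)) := by
          rw [PySem.List.slice_to_natCast sent prefix_ids.length]
          simp [pvH]
        have hfr := pv_foldRK sent prefix_ids hpn hmn (sent.length - prefix_ids.length + 1) 0
          (by omega) (-1) _ h0
        exact hfr.trans hsimple
      · rw [PySem.List.pyRange_one_eq_nil
          (by omega : (sent.length : Int) - (prefix_ids.length : Int) + 1 ≤ 0)]
        simp
    exact hA.trans hB.symm
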